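-- pv_equiv track=rewrite | github.com/ITBearX/EGE | 25/25-03.py | find_div
-- ===== SOURCE A (Python) =====
-- def find_div(n):
--
--     def check(d):
--         return d > 4 and d % 10 in (2, 3)
--
--     div, m = 0, 2
--     while m * m <= n:
--         if n % m == 0:
--             if check(n//m):
--                 return n//m
--             if check(m):
--                 div = m
--         m += 1
--     return div
-- ===== SOURCE B (Python) =====
-- def find_div(n):
--     # collect-then-select: gather divisor pairs, then take the best qualifying one
--     divs = []
--     m = 2
--     while m * m <= n:
--         if n % m == 0:
--             divs.append(m)
--             divs.append(n // m)
--         m += 1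
--     best = 0
--     for d in divs:
--         if d > 4 and d % 10 in (2, 3) and d > best:
--             best = d
--     return best
-- ===== Notes on version B (the rewrite author's own statement) =====
-- stated objective: simpler
-- what changed: A interleaves early-return on a qualifying cofactor with a running record of qualifying small factors; B first collects all divisor pairs in one trial-division pass and then selects the maximum qualifying divisor in a second pass.
import Mathlib
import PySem

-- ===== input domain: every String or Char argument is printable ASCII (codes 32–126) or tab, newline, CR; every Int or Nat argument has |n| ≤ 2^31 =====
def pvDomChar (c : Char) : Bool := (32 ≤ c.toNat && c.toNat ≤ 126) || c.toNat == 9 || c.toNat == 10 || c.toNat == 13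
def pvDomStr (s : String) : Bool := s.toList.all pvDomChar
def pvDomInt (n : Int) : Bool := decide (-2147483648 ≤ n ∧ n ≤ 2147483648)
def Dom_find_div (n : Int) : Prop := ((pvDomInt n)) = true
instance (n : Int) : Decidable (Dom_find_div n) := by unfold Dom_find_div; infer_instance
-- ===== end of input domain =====

-- B restructures A's interleaved early-return/record trial division into a
-- collect-then-select decomposition (same asymptotic cost, plainer logic).
-- Both while-loops are made total with a Nat fuel (n - 1).toNat, which the
-- guard m*m ≤ n (hence m ≤ n) never exhausts; it changes no computed value.

-- ===== PORT A =====
-- the nested helper `check` of A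
def pvCheck (d : Int) : Bool := decide (d > 4) && (PySem.Int.mod d 10 == 2 || PySem.Int.mod d 10 == 3)

-- A's while-loop: state (m, div), early return on a qualifying cofactor
def pvLoopA (n : Int) : Nat → Int → Int → Int
  | 0, _, div => div
  | k + 1, m, div =>
    if m * m ≤ n then
      if PySem.Int.mod n m == 0 then
        if pvCheck (PySem.Int.floordiv n m) then PySem.Int.floordiv n m
        else pvLoopA n k (m + 1) (if pvCheck m then m else div)
      else pvLoopA n k (m + 1) div
    else div

def find_div (n : Int) : Int := pvLoopA n (n - 1).toNat 2 0

-- ===== PORT B =====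
-- first pass of B: collect both members of each divisor pair
def pvCollect (n : Int) : Nat → Int → List Int
  | 0, _ => []
  | k + 1, m =>
    if m * m ≤ n then
      if PySem.Int.mod n m == 0 then m :: PySem.Int.floordiv n m :: pvCollect n k (m + 1)
      else pvCollect n k (m + 1)
    else []

-- second pass of B: keep the best qualifying divisor seen so far
def find_div_alt (n : Int) : Int :=
  (pvCollect n (n - 1).toNat 2).foldl
    (fun best d =>
      if decide (d > 4) && (PySem.Int.mod d 10 == 2 || PySem.Int.mod d 10 == 3) && decide (d > best)
      then d else best) 0

-- ===== PRECONDITION & SPEC =====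
def Spec_find_div (n : Int) (out : Int) : Prop := out = find_div_alt n
instance (n : Int) (out : Int) : Decidable (Spec_find_div n out) := by unfold Spec_find_div; infer_instance

-- ===== CLAIM (what is proved, stated in full; the proofs are below) =====
def Claim_equal_find_div : Prop := ∀ (n : Int), Dom_find_div n → Spec_find_div n (find_div n)

-- ===== LEMMAS AND PROOFS =====

-- B's selection step, named for the proofs
def pvStep (best d : Int) : Int :=
  if decide (d > 4) && (PySem.Int.mod d 10 == 2 || PySem.Int.mod d 10 == 3) && decide (d > best)
  then d else best

theorem pvStep_eq (best d : Int) :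
    pvStep best d = if pvCheck d && decide (d > best) then d else best := by
  simp [pvStep, pvCheck, Bool.and_assoc]

theorem find_div_alt_eq (n : Int) : find_div_alt n = (pvCollect n (n - 1).toNat 2).foldl pvStep 0 := rfl

-- ediv is antitone in a positive divisor (for a nonnegative dividend)
theorem pv_ediv_anti {n m m' : Int} (hn : 0 ≤ n) (hm : 0 < m) (h : m ≤ m') : n / m' ≤ n / m := by
  rw [Int.le_ediv_iff_mul_le hm]
  have h1 : 0 ≤ n / m' := Int.ediv_nonneg hn (by omega)
  have h2 : n / m' * m' ≤ n := Int.ediv_mul_le n (by omega)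
  nlinarith

-- a fold over pvStep is stationary once the accumulator dominates the list
theorem pv_foldl_fix : ∀ (l : List Int) (b : Int), (∀ d ∈ l, d ≤ b) → l.foldl pvStep b = b := by
  intro l
  induction l with
  | nil => intro b _; rfl
  | cons d t ih =>
    intro b hb
    have hd : d ≤ b := hb d (by simp)
    have hs : pvStep b d = b := by
      rw [pvStep_eq]
      have hx : decide (d > b) = false := by simp; omega
      simp [hx]
    simpa [List.foldl, hs] using ih b (fun x hx => hb x (by simp [hx]))

-- every collected divisor from m onward is at most n // m
theorem pv_collect_le (n : Int) : ∀ (k : Nat) (m : Int), 1 ≤ m →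
    ∀ d ∈ pvCollect n k m, d ≤ PySem.Int.floordiv n m := by
  intro k
  induction k with
  | zero => intro m _ d hd; simp [pvCollect] at hd
  | succ k ih =>
    intro m hm d hd
    rw [pvCollect] at hd
    by_cases hg : m * m ≤ n
    · have hn0 : (0:Int) ≤ n := le_trans (mul_self_nonneg m) hg
      have hfd : PySem.Int.floordiv n m = n / m := PySem.Int.floordiv_eq_ediv_of_pos (by omega)
      have hfd1 : PySem.Int.floordiv n (m + 1) = n / (m + 1) :=
        PySem.Int.floordiv_eq_ediv_of_pos (by omega)
      have hmono : PySem.Int.floordiv n (m + 1) ≤ PySem.Int.floordiv n m := by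
        rw [hfd, hfd1]; exact pv_ediv_anti hn0 (by omega) (by omega)
      have hm_le : m ≤ PySem.Int.floordiv n m := by
        rw [hfd]; exact (Int.le_ediv_iff_mul_le (by omega)).mpr hg
      have htail : ∀ x, x ∈ pvCollect n k (m + 1) → x ≤ PySem.Int.floordiv n m := by
        intro x hx
        exact le_trans (ih (m + 1) (by omega) x hx) hmono
      rw [if_pos hg] at hd
      by_cases hmod : (PySem.Int.mod n m == 0) = true
      · rw [if_pos hmod] at hd
        rcases List.mem_cons.mp hd with h1 | hd2
        · exact h1 ▸ hm_le
        · rcases List.mem_cons.mp hd2 with h2 | h3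
          · exact h2 ▸ le_refl _
          · exact htail d h3
      · rw [if_neg hmod] at hd
        exact htail d hd
    · rw [if_neg hg] at hd
      simp at hd

-- main invariant: A's loop equals B's fold over the collected tail, for any record div < m
theorem pv_main (n : Int) : ∀ (k : Nat) (m div : Int), 0 ≤ div → div < m →
    pvLoopA n k m div = (pvCollect n k m).foldl pvStep div := by
  intro k
  induction k with
  | zero => intro m div _ _; rfl
  | succ k ih =>
    intro m div h0 hdm
    rw [pvLoopA, pvCollect]
    by_cases hg : m * m ≤ n
    · have hn0 : (0:Int) ≤ n := le_trans (mul_self_nonneg m) hg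
      have hfd : PySem.Int.floordiv n m = n / m := PySem.Int.floordiv_eq_ediv_of_pos (by omega)
      have hfd1 : PySem.Int.floordiv n (m + 1) = n / (m + 1) :=
        PySem.Int.floordiv_eq_ediv_of_pos (by omega)
      have hm_le : m ≤ PySem.Int.floordiv n m := by
        rw [hfd]; exact (Int.le_ediv_iff_mul_le (by omega)).mpr hg
      rw [if_pos hg, if_pos hg]
      by_cases hmod : (PySem.Int.mod n m == 0) = true
      · rw [if_pos hmod, if_pos hmod]
        have hstep1 : pvStep div m = if pvCheck m then m else div := by
          rw [pvStep_eq]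
          have hx : decide (m > div) = true := by simp; omega
          rcases Bool.eq_false_or_eq_true (pvCheck m) with h | h <;> simp [h, hx]
        by_cases hcq : pvCheck (PySem.Int.floordiv n m) = true
        · -- early return: the cofactor dominates everything still to come
          have hbound : ∀ d ∈ pvCollect n k (m + 1), d ≤ PySem.Int.floordiv n m := by
            intro d hd
            have h1 := pv_collect_le n k (m + 1) (by omega) d hd
            have h2 : PySem.Int.floordiv n (m + 1) ≤ PySem.Int.floordiv n m := by
              rw [hfd, hfd1]; exact pv_ediv_anti hn0 (by omega) (by omega)
            omega
          have hacc : pvStep (pvStep div m) (PySem.Int.floordiv n m) = PySem.Int.floordiv n m := by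
            rw [hstep1]
            by_cases hcm : pvCheck m = true
            · rw [if_pos hcm, pvStep_eq, hcq]
              by_cases hqm : PySem.Int.floordiv n m > m
              · have hx : decide (PySem.Int.floordiv n m > m) = true := by simp; omega
                simp [hx]
              · have heq : PySem.Int.floordiv n m = m := by omega
                simp [heq]
            · rw [if_neg hcm, pvStep_eq, hcq]
              have hx : decide (PySem.Int.floordiv n m > div) = true := by simp; omega
              simp [hx]
          rw [if_pos hcq, List.foldl_cons, List.foldl_cons, hacc, pv_foldl_fix _ _ hbound]
        · -- no early return: both sides continue with the updated record
          rw [if_neg hcq, List.foldl_cons, List.foldl_cons]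
          have hstep2 : pvStep (pvStep div m) (PySem.Int.floordiv n m) = pvStep div m := by
            rw [pvStep_eq (pvStep div m)]; simp [hcq]
          rw [hstep2, hstep1]
          by_cases hcm : pvCheck m = true
          · rw [if_pos hcm]
            exact ih (m + 1) m (by omega) (by omega)
          · rw [if_neg hcm]
            exact ih (m + 1) div h0 (by omega)
      · rw [if_neg hmod, if_neg hmod]
        exact ih (m + 1) div h0 (by omega)
    · rw [if_neg hg, if_neg hg]; rfl

-- ===== VERDICT (by name: the statement is the Claim_ definition above) =====
theorem find_div_spec : Claim_equal_find_div := by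
  intro n _
  show find_div n = find_div_alt n
  rw [find_div_alt_eq]
  exact pv_main n (n - 1).toNat 2 0 (by omega) (by omega)
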